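-- pv_equiv track=rewrite | github.com/LeeYeonGeol/For_Coding_Test | Programmers/Sol_불량 사용자.py | solution
-- ===== SOURCE A (Python) =====
-- from collections import defaultdict
--
-- def solution(user_id, banned_id):
--
--     answer = []
--     dic = defaultdict(list)
--     for user in user_id:
--         for ban in banned_id:
--             if len(user) == len(ban):
--                 cnt = 0
--                 for k in range(len(ban)):
--                     if user[k] == ban[k]:
--                         cnt += 1
--                 if cnt+ban.count("*") == len(ban):
--                     if not user in dic[ban]:
--                         dic[ban].append(user)
--     tmp = []
--
--     def dfs(level):
--         if level == len(banned_id):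
--
--             ntmp = sorted(tmp[:])
--
--             answer.append("".join(ntmp))
--             return
--         for user in dic[banned_id[level]]:
--             if not user in tmp:
--                 tmp.append(user)
--                 dfs(level+1)
--                 tmp.pop()
--
--     dfs(0)
--     answer = set(answer)
--
--     return len(answer)
-- ===== SOURCE B (Python) =====
-- from itertools import product
--
-- def solution(user_id, banned_id):
--     def matches(user, ban):
--         return (len(user) == len(ban)
--                 and sum(u == b for u, b in zip(user, ban)) + ban.count("*") == len(ban))
--
--     candidates = [list(dict.fromkeys(u for u in user_id if matches(u, ban)))
--                   for ban in banned_id]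
--     answer = {"".join(sorted(combo))
--               for combo in product(*candidates)
--               if len(set(combo)) == len(combo)}
--     return len(answer)
-- ===== Notes on version B (the rewrite author's own statement) =====
-- stated objective: simpler
-- what changed: Replaces A's recursive DFS with backtracking over a defaultdict (append/pop on a shared tmp list, answers collected in a list then set-deduplicated) by a flat itertools.product enumeration of per-pattern candidate lists, filtered for all-distinct tuples and deduplicated in a set comprehension with the same sorted-join key.
import Mathlib
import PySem

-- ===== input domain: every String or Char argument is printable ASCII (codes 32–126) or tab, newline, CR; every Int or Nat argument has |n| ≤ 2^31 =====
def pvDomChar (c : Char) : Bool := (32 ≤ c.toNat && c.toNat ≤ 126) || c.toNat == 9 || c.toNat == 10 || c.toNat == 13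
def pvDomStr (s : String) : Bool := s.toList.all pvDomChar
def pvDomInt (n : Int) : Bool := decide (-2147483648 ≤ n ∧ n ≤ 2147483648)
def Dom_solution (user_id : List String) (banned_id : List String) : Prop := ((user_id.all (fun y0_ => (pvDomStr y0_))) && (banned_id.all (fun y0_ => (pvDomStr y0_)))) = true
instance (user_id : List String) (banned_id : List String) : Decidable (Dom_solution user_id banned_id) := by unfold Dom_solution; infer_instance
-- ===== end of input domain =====

-- B replaces A's recursive DFS over a pattern-indexed dict by a direct Cartesian-product
-- enumeration of per-pattern candidate lists (objective: simpler); return values only, no mutation.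

-- ===== PORT A =====

-- cnt loop: 'for k in range(len(ban)): if user[k] == ban[k]: cnt += 1'
def pvCntA (user ban : String) : Int :=
  (PySem.List.pyRange 0 (PySem.Str.len ban) 1).foldl
    (fun cnt k => if PySem.Str.pyGet? user k == PySem.Str.pyGet? ban k then cnt + 1 else cnt) 0

-- the double loop building dic; defaultdict's creation of an empty entry on a mere read is
-- observationally irrelevant here (the dict is only ever read via getD with default []), so
-- only appends insert.
def pvDicA (user_id banned_id : List String) : PySem.Dict String (List String) :=
  user_id.foldl (fun d user =>
    banned_id.foldl (fun d ban =>
      if PySem.Str.len user == PySem.Str.len ban then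
        if pvCntA user ban + (PySem.Str.count ban "*" : Int) == PySem.Str.len ban then
          let cur := d.getD ban []
          if user ∈ cur then d else d.insert ban (cur ++ [user])
        else d
      else d) d) PySem.Dict.empty

-- 'ntmp = sorted(tmp[:]); answer.append("".join(ntmp))'
def pvKeyA (tmp : List String) : String :=
  PySem.Str.join "" (PySem.List.sorted tmp (fun x => x) false)

-- the recursive dfs; recursion on the remaining suffix of banned_id; the inner 'for user in
-- dic[banned_id[level]]' loop is the mutual pvDfsLoopA (foldl-accumulation written as per-element
-- concatenation so the mutual structural recursion is visible).
mutual
def pvDfsA (dic : PySem.Dict String (List String)) : List String → List String → List String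
  | tmp, [] => [pvKeyA tmp]
  | tmp, ban :: rest => pvDfsLoopA dic (dic.getD ban []) tmp rest

def pvDfsLoopA (dic : PySem.Dict String (List String)) : List String → List String → List String → List String
  | [], _, _ => []
  | user :: users, tmp, rest =>
      (if user ∈ tmp then [] else pvDfsA dic (tmp ++ [user]) rest) ++ pvDfsLoopA dic users tmp rest
end

def solution (user_id : List String) (banned_id : List String) : Int :=
  let dic := pvDicA user_id banned_id
  let answer := pvDfsA dic [] banned_id
  PySem.Set.len (PySem.Set.ofList answer)

-- ===== PORT B =====

-- 'len(user) == len(ban) and sum(u == b for u, b in zip(user, ban)) + ban.count("*") == len(ban)'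
def pvMatchesB (user ban : String) : Bool :=
  PySem.Str.len user == PySem.Str.len ban &&
  ((user.toList.zip ban.toList).map (fun p => if p.1 == p.2 then (1 : Int) else 0)).sum
    + (PySem.Str.count ban "*" : Int) == PySem.Str.len ban

-- itertools.product(*candidates), first factor outermost, as lists
def pvProductB (ls : List (List String)) : List (List String) :=
  ls.foldr (fun cs acc => cs.flatMap (fun c => acc.map (c :: ·))) [[]]

def solution_alt (user_id : List String) (banned_id : List String) : Int :=
  let candidates := banned_id.map (fun ban =>
    PySem.List.dedup (user_id.filter (fun u => pvMatchesB u ban)))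
  let answer := PySem.Set.ofList
    (((pvProductB candidates).filter
        (fun combo => PySem.Set.len (PySem.Set.ofList combo) == (combo.length : Int))).map
      (fun combo => PySem.Str.join "" (PySem.List.sorted combo (fun x => x) false)))
  (answer.length : Int)

-- ===== PRECONDITION & SPEC =====
def Spec_solution (user_id : List String) (banned_id : List String) (out : Int) : Prop := out = solution_alt user_id banned_id
instance (user_id : List String) (banned_id : List String) (out : Int) : Decidable (Spec_solution user_id banned_id out) := by unfold Spec_solution; infer_instance

-- ===== CLAIM (what is proved, stated in full; the proofs are below) =====
def Claim_equal_solution : Prop := ∀ (user_id : List String) (banned_id : List String), Dom_solution user_id banned_id → Spec_solution user_id banned_id (solution user_id banned_id)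

-- ===== LEMMAS AND PROOFS =====

-- A's combined match guard, for stating the dict invariant
def pvGuardA (user ban : String) : Bool :=
  (PySem.Str.len user == PySem.Str.len ban) &&
  (pvCntA user ban + (PySem.Str.count ban "*" : Int) == PySem.Str.len ban)

-- the DFS prune condition along a whole combo
def pvFresh (tmp : List String) : List String → Bool
  | [] => true
  | u :: c => !(decide (u ∈ tmp)) && pvFresh (tmp ++ [u]) c

theorem pv_countP_range_zip (cs ds : List Char) (h : cs.length = ds.length) :
    (List.range ds.length).countP (fun k => cs[k]? == ds[k]?)
      = (cs.zip ds).countP (fun p => p.1 == p.2) := by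
  induction ds generalizing cs with
  | nil => simp at h; simp [h]
  | cons d ds ih =>
    cases cs with
    | nil => simp at h
    | cons c cs =>
      simp only [List.length_cons] at h
      simp only [List.length_cons, List.range_succ_eq_map, List.countP_cons, List.countP_map,
        List.zip_cons_cons, List.getElem?_cons_zero]
      have hf : ((fun k => (c :: cs)[k]? == (d :: ds)[k]?) ∘ Nat.succ)
          = (fun k => cs[k]? == ds[k]?) := funext fun k => by simp
      rw [hf, ih cs (by omega)]
      simp

theorem pv_cnt_eq (user ban : String) (h : user.toList.length = ban.toList.length) :
    pvCntA user ban
      = ((user.toList.zip ban.toList).map (fun p => if p.1 == p.2 then (1 : Int) else 0)).sum := by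
  unfold pvCntA
  rw [PySem.List.sum_map_ite_one_zero]
  simp only [PySem.Str.len_eq, PySem.List.pyRange_zero_natCast, List.foldl_map]
  rw [PySem.List.foldl_if_add_one]
  rw [← pv_countP_range_zip user.toList ban.toList h]
  simp [pysem]

theorem pv_guard_eq (user ban : String) : pvGuardA user ban = pvMatchesB user ban := by
  unfold pvGuardA pvMatchesB
  by_cases h : PySem.Str.len user = PySem.Str.len ban
  · have hl : user.toList.length = ban.toList.length := by
      have := h; simp only [PySem.Str.len_eq] at this; exact_mod_cast this
    rw [pv_cnt_eq user ban hl]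
  · have hb : (PySem.Str.len user == PySem.Str.len ban) = false := beq_eq_false_iff_ne.mpr h
    rw [hb]; simp

theorem pv_inner_getD (user : String) (bs : List String) (d : PySem.Dict String (List String))
    (ban : String) :
    (bs.foldl (fun d ban =>
      if PySem.Str.len user == PySem.Str.len ban then
        if pvCntA user ban + (PySem.Str.count ban "*" : Int) == PySem.Str.len ban then
          let cur := d.getD ban []
          if user ∈ cur then d else d.insert ban (cur ++ [user])
        else d
      else d) d).getD ban []
    = if ban ∈ bs ∧ pvGuardA user ban = true ∧ user ∉ d.getD ban []
      then d.getD ban [] ++ [user] else d.getD ban [] := by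
  induction bs generalizing d with
  | nil => simp
  | cons b bs ih =>
    rw [List.foldl_cons, ih]
    by_cases hg : pvGuardA user b = true
    · rw [pvGuardA, Bool.and_eq_true] at hg
      obtain ⟨h1, h2⟩ := hg
      simp only [h1, h2, if_true]
      by_cases hmem : user ∈ d.getD b []
      · simp only [hmem, if_true]
        by_cases hb : ban = b
        · subst hb
          have hgb : pvGuardA user ban = true := by rw [pvGuardA, Bool.and_eq_true]; exact ⟨h1, h2⟩
          split_ifs <;> tauto
        · simp [List.mem_cons, hb]
      · simp only [hmem, if_false]
        by_cases hb : ban = b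
        · subst hb
          have hgb : pvGuardA user ban = true := by rw [pvGuardA, Bool.and_eq_true]; exact ⟨h1, h2⟩
          simp only [PySem.Dict.getD_insert]
          have : user ∈ d.getD ban [] ++ [user] := by simp
          split_ifs <;> simp_all
        · simp only [PySem.Dict.getD_insert, if_neg hb]
          simp [List.mem_cons, hb]
    · have hg' : pvGuardA user b = false := by simpa using hg
      rw [pvGuardA, Bool.and_eq_false_iff] at hg'
      have hstep : (if (PySem.Str.len user == PySem.Str.len b) = true then
          if (pvCntA user b + (PySem.Str.count b "*" : Int) == PySem.Str.len b) = true then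
            let cur := d.getD b []
            if user ∈ cur then d else d.insert b (cur ++ [user])
          else d
        else d) = d := by
        rcases hg' with h | h <;> rw [h] <;> simp
      rw [hstep]
      by_cases hb : ban = b
      · subst hb
        have : pvGuardA user ban = false := by simpa using hg
        split_ifs <;> simp_all
      · simp [List.mem_cons, hb]

theorem pv_outer_getD (bs : List String) (ban : String) (hban : ban ∈ bs)
    (us : List String) (d : PySem.Dict String (List String)) :
    (us.foldl (fun d user => bs.foldl (fun d ban =>
      if PySem.Str.len user == PySem.Str.len ban then
        if pvCntA user ban + (PySem.Str.count ban "*" : Int) == PySem.Str.len ban then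
          let cur := d.getD ban []
          if user ∈ cur then d else d.insert ban (cur ++ [user])
        else d
      else d) d) d).getD ban []
    = us.foldl (fun l u => if pvGuardA u ban = true then (if u ∈ l then l else l ++ [u]) else l)
        (d.getD ban []) := by
  induction us generalizing d with
  | nil => simp
  | cons u us ih =>
    rw [List.foldl_cons, List.foldl_cons, ih]
    rw [pv_inner_getD u bs d ban]
    split_ifs <;> tauto

theorem pv_foldl_add_sublist {α : Type} [BEq α] (xs : List α) (s : List α) :
    (xs.foldl PySem.Set.add s).Sublist (s ++ xs) := by
  induction xs generalizing s with
  | nil => simp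
  | cons x xs ih =>
    rw [List.foldl_cons]
    refine (ih (PySem.Set.add s x)).trans ?_
    unfold PySem.Set.add PySem.Set.contains
    by_cases hx : s.contains x = true
    · rw [if_pos hx]
      exact List.Sublist.append_left (List.sublist_cons_self x xs) s
    · rw [if_neg hx]
      simp

theorem pv_foldl_add_of_nodup {α : Type} [BEq α] [LawfulBEq α] (xs : List α) (s : List α)
    (h : (s ++ xs).Nodup) : xs.foldl PySem.Set.add s = s ++ xs := by
  induction xs generalizing s with
  | nil => simp
  | cons x xs ih =>
    have hx : x ∉ s := by
      intro hmem
      exact (List.disjoint_of_nodup_append h) hmem (List.mem_cons_self ..)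
    have hadd : PySem.Set.add s x = s ++ [x] := by
      unfold PySem.Set.add PySem.Set.contains
      rw [if_neg (by simpa using hx)]
    rw [List.foldl_cons, hadd, ih (s ++ [x]) (by simpa using h)]
    simp

theorem pv_ofList_len_iff {α : Type} [BEq α] [LawfulBEq α] (xs : List α) :
    ((PySem.Set.ofList xs).length = xs.length) ↔ xs.Nodup := by
  constructor
  · intro hlen
    have hsub : (PySem.Set.ofList xs).Sublist xs := by
      rw [PySem.Set.ofList_eq_foldl]
      simpa using pv_foldl_add_sublist xs []
    have := hsub.eq_of_length hlen
    rw [← this]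
    exact PySem.Set.nodup_ofList xs
  · intro hnd
    rw [PySem.Set.ofList_eq_foldl, pv_foldl_add_of_nodup xs [] (by simpa using hnd)]
    simp

theorem pv_dic_getD (user_id bs : List String) (ban : String) (hban : ban ∈ bs) :
    (pvDicA user_id bs).getD ban []
      = PySem.List.dedup (user_id.filter (fun u => pvMatchesB u ban)) := by
  unfold pvDicA
  rw [pv_outer_getD bs ban hban user_id PySem.Dict.empty, PySem.Dict.getD_empty]
  simp only [pv_guard_eq]
  rw [PySem.List.foldl_if_eq_foldl_filter (fun u => pvMatchesB u ban)
    (fun l u => if u ∈ l then l else l ++ [u]) user_id []]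
  rw [PySem.List.dedup_eq_ofList, PySem.Set.ofList_eq_foldl]
  have hf : (fun (l : List String) (u : String) => if u ∈ l then l else l ++ [u])
      = PySem.Set.add := by
    funext l u
    simp [PySem.Set.add]
  rw [hf]

theorem pv_fresh_eq_nodup (c tmp : List String) (h : tmp.Nodup) :
    pvFresh tmp c = decide (tmp ++ c).Nodup := by
  induction c generalizing tmp with
  | nil => simpa [pvFresh] using h
  | cons u c ih =>
    by_cases hu : u ∈ tmp
    · have : ¬ (tmp ++ u :: c).Nodup := by
        intro hnd
        exact (List.disjoint_of_nodup_append hnd) hu (List.mem_cons_self ..)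
      simp [pvFresh, hu, this]
    · have h' : (tmp ++ [u]).Nodup := by
        simp [List.nodup_append, h]
        exact fun a ha he => hu (he ▸ ha)
      rw [show tmp ++ u :: c = (tmp ++ [u]) ++ c by simp]
      simp [pvFresh, hu, ih (tmp ++ [u]) h']

theorem pv_dfsLoop_eq (dic : PySem.Dict String (List String)) (users tmp rest : List String) :
    pvDfsLoopA dic users tmp rest
      = users.flatMap (fun u => if u ∈ tmp then [] else pvDfsA dic (tmp ++ [u]) rest) := by
  induction users with
  | nil => simp [pvDfsLoopA]
  | cons u users ih => rw [pvDfsLoopA, ih, List.flatMap_cons]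

theorem pv_dfs_eq (dic : PySem.Dict String (List String)) (rest tmp : List String) :
    pvDfsA dic tmp rest
      = ((pvProductB (rest.map (fun b => dic.getD b []))).filter (pvFresh tmp)).map
          (fun c => pvKeyA (tmp ++ c)) := by
  induction rest generalizing tmp with
  | nil => simp [pvDfsA, pvProductB, pvFresh]
  | cons ban rest ih =>
    rw [pvDfsA, pv_dfsLoop_eq]
    have hprod : pvProductB ((ban :: rest).map (fun b => dic.getD b []))
        = (dic.getD ban []).flatMap
            (fun u => (pvProductB (rest.map (fun b => dic.getD b []))).map (u :: ·)) := rfl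
    rw [hprod, List.filter_flatMap, List.map_flatMap]
    refine congrArg ((dic.getD ban []).flatMap ·) (funext fun u => ?_)
    by_cases hu : u ∈ tmp
    · have : ∀ c, pvFresh tmp (u :: c) = false := by
        intro c; simp [pvFresh, hu]
      simp only [hu, if_pos, List.filter_map]
      rw [show ((pvFresh tmp) ∘ (u :: ·)) = fun _ => false from funext fun c => this c]
      simp
    · simp only [hu, ih (tmp ++ [u]), List.filter_map]
      rw [show ((pvFresh tmp) ∘ (u :: ·)) = pvFresh (tmp ++ [u]) from
        funext fun c => by simp [pvFresh, hu]]
      rw [List.map_map]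
      refine List.map_congr_left fun c _ => ?_
      simp

-- ===== VERDICT (by name: the statement is the Claim_ definition above) =====
theorem solution_spec : Claim_equal_solution := by
  intro user_id banned_id _
  unfold Spec_solution solution solution_alt
  dsimp only
  rw [pv_dfs_eq (pvDicA user_id banned_id) banned_id []]
  rw [List.map_congr_left (fun ban hban =>
    pv_dic_getD user_id banned_id ban hban)]
  rw [show (pvFresh []) = (fun combo : List String =>
      PySem.Set.len (PySem.Set.ofList combo) == (combo.length : Int)) from
    funext fun c => by
      rw [pv_fresh_eq_nodup c [] List.nodup_nil]
      simp only [PySem.Set.len, List.nil_append]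
      rw [show ((↑(List.length (PySem.Set.ofList c)) : Int) == (↑c.length : Int))
          = decide ((PySem.Set.ofList c).length = c.length) from by rw [beq_eq_decide]; simp]
      exact decide_eq_decide.mpr (pv_ofList_len_iff c).symm]
  simp [PySem.Set.len, pvKeyA]
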